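-- pv_equiv track=rewrite | github.com/tn82/advent-of-code | 2021/21.py | dice100
-- ===== SOURCE A (Python) =====
-- def dice100(dice, dice_n, n):
--     sum = 0
--     for _ in range(n):
--         dice += 1
--         dice_n += 1
--         dice = (dice - 1) % 100 + 1
--         sum += dice
--     return dice, dice_n, sum
-- ===== SOURCE B (Python) =====
-- def dice100(dice, dice_n, n):
--     # Closed-form: rolls wrap cyclically through 1..100, so the sum is
--     # n plus a difference of prefix sums of (j % 100); O(1) instead of O(n).
--     if n <= 0:
--         return dice, dice_n, 0
--
--     def f(m):
--         # sum of j % 100 for j in range(m)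
--         q, t = divmod(m, 100)
--         return q * 4950 + t * (t - 1) // 2
--
--     s = dice % 100
--     total = n + f(s + n) - f(s)
--     last = (s + n - 1) % 100 + 1
--     return last, dice_n + n, total
-- ===== Notes on version B (the rewrite author's own statement) =====
-- stated objective: faster
-- what changed: Replaces the O(n) roll-by-roll loop with a closed-form O(1) computation: the wrapped rolls are a consecutive segment of the 1..100 cycle, so the sum is n plus a difference of prefix sums of j%100 and the final die face is a single modular expression.
import Mathlib
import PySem

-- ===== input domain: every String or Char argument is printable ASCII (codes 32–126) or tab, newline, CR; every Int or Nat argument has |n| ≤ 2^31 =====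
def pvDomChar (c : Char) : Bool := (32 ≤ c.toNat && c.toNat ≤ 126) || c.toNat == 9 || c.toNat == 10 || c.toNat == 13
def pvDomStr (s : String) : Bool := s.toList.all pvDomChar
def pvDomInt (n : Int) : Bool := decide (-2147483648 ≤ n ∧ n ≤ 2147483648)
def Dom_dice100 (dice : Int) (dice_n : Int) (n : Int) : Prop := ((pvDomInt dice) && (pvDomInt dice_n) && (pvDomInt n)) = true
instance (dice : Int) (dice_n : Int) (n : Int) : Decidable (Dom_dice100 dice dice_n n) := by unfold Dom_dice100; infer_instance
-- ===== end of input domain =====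

-- B replaces A's O(n) roll-by-roll loop with an O(1) closed-form (cycle count × 5050 idea via prefix sums of j % 100); return value only, no mutation.

-- ===== PORT A =====
-- Loop body of A: dice += 1; dice_n += 1; dice = (dice-1) % 100 + 1; sum += dice
def dice100Step (st : Int × Int × Int) : Int × Int × Int :=
  let d := st.1 + 1
  let dn := st.2.1 + 1
  let d' := PySem.Int.mod (d - 1) 100 + 1
  (d', dn, st.2.2 + d')

def dice100 (dice : Int) (dice_n : Int) (n : Int) : List Int :=
  let r := (PySem.List.pyRange 0 n 1).foldl (fun st _ => dice100Step st) (dice, dice_n, 0)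
  [r.1, r.2.1, r.2.2]

-- ===== PORT B =====
-- f m = sum of (j % 100) for j in range(m), computed in closed form (Source B's helper f)
def dice100F (m : Int) : Int :=
  let q := PySem.Int.floordiv m 100
  let t := PySem.Int.mod m 100
  q * 4950 + PySem.Int.floordiv (t * (t - 1)) 2

def dice100_alt (dice : Int) (dice_n : Int) (n : Int) : List Int :=
  if n ≤ 0 then [dice, dice_n, 0]
  else
    let s := PySem.Int.mod dice 100
    let total := n + dice100F (s + n) - dice100F s
    let last := PySem.Int.mod (s + n - 1) 100 + 1
    [last, dice_n + n, total]

-- ===== PRECONDITION & SPEC =====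
def Spec_dice100 (dice : Int) (dice_n : Int) (n : Int) (out : List Int) : Prop := out = dice100_alt dice dice_n n
instance (dice : Int) (dice_n : Int) (n : Int) (out : List Int) : Decidable (Spec_dice100 dice dice_n n out) := by unfold Spec_dice100; infer_instance

-- ===== CLAIM (what is proved, stated in full; the proofs are below) =====
def Claim_equal_dice100 : Prop := ∀ (dice : Int) (dice_n : Int) (n : Int), Dom_dice100 dice dice_n n → Spec_dice100 dice dice_n n (dice100 dice dice_n n)

-- ===== LEMMAS AND PROOFS =====


-- A's loop as fuelled recursion (proof helper)
def dice100Loop : Nat → Int × Int × Int → Int × Int × Int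
  | 0, st => st
  | k + 1, st => dice100Loop k (dice100Step st)

lemma dice100Step_eq (d dn s : Int) :
    dice100Step (d, dn, s) = (d % 100 + 1, dn + 1, s + (d % 100 + 1)) := by
  have h : d + 1 - 1 = d := by ring
  simp [dice100Step, h]

lemma dice100_foldl_eq_loop (k : Nat) : ∀ (a b : Int), (b - a).toNat = k →
    ∀ st : Int × Int × Int,
      (PySem.List.pyRange a b 1).foldl (fun st _ => dice100Step st) st
        = dice100Loop k st := by
  induction k with
  | zero =>
    intro a b hk st
    rw [PySem.List.pyRange_one_eq_nil (by omega)]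
    rfl
  | succ k ih =>
    intro a b hk st
    rw [PySem.List.pyRange_one_cons (by omega)]
    simpa [dice100Loop] using ih (a + 1) b (by omega) (dice100Step st)

-- f over Int.ediv/emod (Python // and % agree with them for a positive divisor)
lemma dice100F_eq (m : Int) :
    dice100F m = (m / 100) * 4950 + (m % 100) * (m % 100 - 1) / 2 := by
  simp [dice100F, PySem.Int.floordiv_eq_ediv_of_pos, PySem.Int.mod_eq_emod_of_pos]

lemma dice100F_succ (m : Int) : dice100F (m + 1) = dice100F m + m % 100 := by
  rw [dice100F_eq, dice100F_eq]
  by_cases hc : m % 100 = 99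
  · have e1 : (m + 1) % 100 = 0 := by omega
    have e2 : (m + 1) / 100 = m / 100 + 1 := by omega
    rw [e1, e2, hc]
    norm_num
    ring
  · have e1 : (m + 1) % 100 = m % 100 + 1 := by omega
    have e2 : (m + 1) / 100 = m / 100 := by omega
    rw [e1, e2]
    have key : (m % 100 + 1) * (m % 100 + 1 - 1) / 2
        = m % 100 * (m % 100 - 1) / 2 + m % 100 := by
      have h : (m % 100 + 1) * (m % 100 + 1 - 1)
          = m % 100 * (m % 100 - 1) + m % 100 * 2 := by ring
      rw [h, Int.add_mul_ediv_right _ _ (by norm_num : (2:Int) ≠ 0)]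
    rw [key]; ring

lemma dice100F_add_100 (m : Int) : dice100F (m + 100) = dice100F m + 4950 := by
  rw [dice100F_eq, dice100F_eq]
  have e1 : (m + 100) % 100 = m % 100 := by omega
  have e2 : (m + 100) / 100 = m / 100 + 1 := by omega
  rw [e1, e2]; ring

-- main closed form of A's loop
lemma dice100Loop_closed (k : Nat) : ∀ (d dn s : Int),
    dice100Loop (k + 1) (d, dn, s)
      = ((d % 100 + (k : Int)) % 100 + 1, dn + ((k : Int) + 1),
         s + ((k : Int) + 1) + dice100F (d % 100 + ((k : Int) + 1)) - dice100F (d % 100)) := by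
  induction k with
  | zero =>
    intro d dn s
    have hF : dice100F (d % 100 + 1) = dice100F (d % 100) + d % 100 := by
      have h2 : d % 100 % 100 = d % 100 := by omega
      simpa [h2] using dice100F_succ (d % 100)
    show dice100Step (d, dn, s) = _
    rw [dice100Step_eq]
    simp only [Nat.cast_zero, zero_add, add_zero]
    rw [Prod.ext_iff, Prod.ext_iff]
    refine ⟨by omega, by ring, ?_⟩
    rw [hF]; ring
  | succ k ih =>
    intro d dn s
    show dice100Loop (k + 1) (dice100Step (d, dn, s)) = _
    rw [dice100Step_eq, ih]
    have ha : 0 ≤ d % 100 ∧ d % 100 < 100 := ⟨Int.emod_nonneg d (by norm_num), Int.emod_lt_of_pos d (by norm_num)⟩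
    refine Prod.ext ?_ (Prod.ext ?_ ?_)
    · show ((d % 100 + 1) % 100 + (k : Int)) % 100 + 1 = (d % 100 + ((k : Int) + 1)) % 100 + 1
      omega
    · show dn + 1 + ((k : Int) + 1) = dn + (((k : Int) + 1) + 1)
      ring
    · show s + (d % 100 + 1) + ((k : Int) + 1)
          + dice100F ((d % 100 + 1) % 100 + ((k : Int) + 1)) - dice100F ((d % 100 + 1) % 100)
        = s + (((k : Int) + 1) + 1) + dice100F (d % 100 + (((k : Int) + 1) + 1)) - dice100F (d % 100)
      by_cases hc : d % 100 = 99
      · have e1 : (d % 100 + 1) % 100 = 0 := by omega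
        rw [e1, hc]
        have h1 : (99 : Int) + (((k : Int) + 1) + 1) = ((0 : Int) + ((k : Int) + 1)) + 100 := by ring
        rw [h1, dice100F_add_100]
        have hF0 : dice100F 0 = 0 := by decide
        have hF99 : dice100F 99 = 4851 := by decide
        rw [hF0, hF99]; ring
      · have e1 : (d % 100 + 1) % 100 = d % 100 + 1 := by omega
        rw [e1]
        have h1 : d % 100 + 1 + ((k : Int) + 1) = (d % 100 + ((k : Int) + 1)) + 1 := by ring
        have h2 : d % 100 + (((k : Int) + 1) + 1) = (d % 100 + ((k : Int) + 1)) + 1 := by ring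
        rw [h1, h2, dice100F_succ, dice100F_succ]
        have h3 : d % 100 % 100 = d % 100 := by omega
        omega

-- ===== VERDICT (by name: the statement is the Claim_ definition above) =====

theorem dice100_spec : Claim_equal_dice100 := by
  intro dice dice_n n _
  show dice100 dice dice_n n = dice100_alt dice dice_n n
  unfold dice100 dice100_alt
  by_cases hn : n ≤ 0
  · rw [if_pos hn, PySem.List.pyRange_one_eq_nil (by omega)]
    rfl
  · rw [if_neg hn]
    have hk : (n - 0).toNat = (n.toNat - 1) + 1 := by omega
    rw [dice100_foldl_eq_loop _ 0 n hk, dice100Loop_closed]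
    have hc : ((n.toNat - 1 : Nat) : Int) = n - 1 := by omega
    rw [hc]
    have hm : PySem.Int.mod dice 100 = dice % 100 :=
      PySem.Int.mod_eq_emod_of_pos (by norm_num)
    simp only [hm]
    rw [PySem.Int.mod_eq_emod_of_pos (by norm_num)]
    have e1 : dice % 100 + n - 1 = dice % 100 + (n - 1) := by ring
    have e2 : n - 1 + 1 = n := by ring
    rw [e1, e2]
    norm_num
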